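-- pv_equiv track=rewrite | github.com/lesoto/apgi-experiments | apgi_framework/deployment/hardware_configuration.py | _generate_standard_10_20_names
-- ===== SOURCE A (Python) =====
-- from typing import Dict, List, Optional, Any
--
-- def _generate_standard_10_20_names(n_channels: int) -> List[str]:
--     """Generate standard 10-20 system channel names."""
--     standard_names = [
--         "Fp1",
--         "Fp2",
--         "F7",
--         "F3",
--         "Fz",
--         "F4",
--         "F8",
--         "T7",
--         "C3",
--         "Cz",
--         "C4",
--         "T8",
--         "P7",
--         "P3",
--         "Pz",
--         "P4",
--         "P8",
--         "O1",
--         "Oz",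
--         "O2",
--         "F9",
--         "F10",
--         "T9",
--         "T10",
--         "P9",
--         "P10",
--         "FC1",
--         "FC2",
--         "FC5",
--         "FC6",
--         "CP1",
--         "CP2",
--         "CP5",
--         "CP6",
--     ]
--
--     if n_channels <= len(standard_names):
--         return standard_names[:n_channels]
--     else:
--         # Add extra channels
--         extra = [f"EX{i+1}" for i in range(n_channels - len(standard_names))]
--         return standard_names + extra
-- ===== SOURCE B (Python) =====
-- _STANDARD = [
--     "Fp1", "Fp2", "F7", "F3", "Fz", "F4", "F8", "T7", "C3", "Cz",
--     "C4", "T8", "P7", "P3", "Pz", "P4", "P8", "O1", "Oz", "O2",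
--     "F9", "F10", "T9", "T10", "P9", "P10", "FC1", "FC2", "FC5", "FC6",
--     "CP1", "CP2", "CP5", "CP6",
-- ]
--
--
-- def _name_at(i):
--     """Name of channel index i: a standard 10-20 name, then EX1, EX2, ..."""
--     if i < len(_STANDARD):
--         return _STANDARD[i]
--     return f"EX{i - len(_STANDARD) + 1}"
--
--
-- def _generate_standard_10_20_names(n_channels: int):
--     """Generate standard 10-20 system channel names."""
--     return [_name_at(i) for i in range(n_channels)]
-- ===== Notes on version B (the rewrite author's own statement) =====
-- stated objective: alternative
-- what changed: Replaces A's branch on n_channels with slice/concatenate list surgery by a single per-index closed-form mapping: element i of the output is computed directly (standard name for i<34, else EXk) over range(n_channels), with no slicing or concatenation.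
-- intended difference: For -34 < n_channels < 0 A's negative slice standard_names[:n_channels] wraps around and returns the first 34+n_channels standard names, while B returns the empty list, which is the intended result of asking for a non-positive number of channel names. — e.g. on _generate_standard_10_20_names(-33): A returns ["Fp1"], B returns []
import Mathlib
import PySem

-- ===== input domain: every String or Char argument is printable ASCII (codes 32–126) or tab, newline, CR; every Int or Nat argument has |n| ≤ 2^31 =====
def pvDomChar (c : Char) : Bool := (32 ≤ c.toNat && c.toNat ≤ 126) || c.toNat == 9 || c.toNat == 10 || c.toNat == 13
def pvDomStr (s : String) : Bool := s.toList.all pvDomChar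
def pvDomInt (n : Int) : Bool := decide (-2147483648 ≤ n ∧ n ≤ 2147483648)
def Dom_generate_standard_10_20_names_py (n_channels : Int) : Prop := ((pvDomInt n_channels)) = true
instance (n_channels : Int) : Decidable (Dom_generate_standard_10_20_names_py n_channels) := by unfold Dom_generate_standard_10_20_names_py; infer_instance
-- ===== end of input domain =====

-- B replaces A's if/else slice-or-concatenate list surgery by a single per-index closed-form
-- mapping over range(n_channels); on -34 < n_channels < 0 B returns [] where A's negative
-- slice wraps around (stated as the intended difference D_ below).

-- the standard_names literal (shared by both sources)
def pvStdNames : List String :=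
  ["Fp1", "Fp2", "F7", "F3", "Fz", "F4", "F8", "T7", "C3", "Cz",
   "C4", "T8", "P7", "P3", "Pz", "P4", "P8", "O1", "Oz", "O2",
   "F9", "F10", "T9", "T10", "P9", "P10", "FC1", "FC2", "FC5", "FC6",
   "CP1", "CP2", "CP5", "CP6"]

-- ===== PORT A =====
def generate_standard_10_20_names_py (n_channels : Int) : List String :=
  let standard_names := pvStdNames
  if n_channels ≤ (standard_names.length : Int) then
    PySem.List.slice standard_names none (some n_channels)
  else
    let extra := (PySem.List.pyRange 0 (n_channels - (standard_names.length : Int)) 1).map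
      (fun i => "EX" ++ PySem.Int.toStr (i + 1))
    standard_names ++ extra

-- ===== PORT B =====
-- _name_at of Source B: the name of channel index i, computed directly
def pvNameAt (i : Int) : String :=
  if i < (pvStdNames.length : Int) then PySem.List.pyGetD pvStdNames i ""
  else "EX" ++ PySem.Int.toStr (i - (pvStdNames.length : Int) + 1)

def generate_standard_10_20_names_py_alt (n_channels : Int) : List String :=
  (PySem.List.pyRange 0 n_channels 1).map pvNameAt

-- ===== PRECONDITION & SPEC =====
-- For -34 < n_channels < 0 A's negative slice standard_names[:n_channels] wraps around and returns
-- the first 34+n_channels standard names, while B returns [], the intended result for a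
-- non-positive channel count.
def D_generate_standard_10_20_names_py (n_channels : Int) : Prop :=
  -34 < n_channels ∧ n_channels < 0
instance (n_channels : Int) : Decidable (D_generate_standard_10_20_names_py n_channels) := by
  unfold D_generate_standard_10_20_names_py; infer_instance

def Spec_generate_standard_10_20_names_py (n_channels : Int) (out : List String) : Prop :=
  ¬ D_generate_standard_10_20_names_py n_channels → out = generate_standard_10_20_names_py_alt n_channels
instance (n_channels : Int) (out : List String) : Decidable (Spec_generate_standard_10_20_names_py n_channels out) := by
  unfold Spec_generate_standard_10_20_names_py; infer_instance

def pvDiffWitness_generate_standard_10_20_names_py : Int := -33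
def pvDiffWitnessOut_generate_standard_10_20_names_py : (List String) × (List String) :=
  (["Fp1"], [])

-- ===== CLAIM =====
def Claim_unchanged_generate_standard_10_20_names_py : Prop := ∀ (n_channels : Int), Dom_generate_standard_10_20_names_py n_channels → Spec_generate_standard_10_20_names_py n_channels (generate_standard_10_20_names_py n_channels)
def Claim_changed_generate_standard_10_20_names_py : Prop := Dom_generate_standard_10_20_names_py (pvDiffWitness_generate_standard_10_20_names_py) ∧ D_generate_standard_10_20_names_py (pvDiffWitness_generate_standard_10_20_names_py) ∧ generate_standard_10_20_names_py (pvDiffWitness_generate_standard_10_20_names_py) = pvDiffWitnessOut_generate_standard_10_20_names_py.1 ∧ generate_standard_10_20_names_py_alt (pvDiffWitness_generate_standard_10_20_names_py) = pvDiffWitnessOut_generate_standard_10_20_names_py.2 ∧ pvDiffWitnessOut_generate_standard_10_20_names_py.1 ≠ pvDiffWitnessOut_generate_standard_10_20_names_py.2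
def Claim_exact_generate_standard_10_20_names_py : Prop := ∀ (n_channels : Int), Dom_generate_standard_10_20_names_py n_channels → D_generate_standard_10_20_names_py n_channels → generate_standard_10_20_names_py n_channels ≠ generate_standard_10_20_names_py_alt n_channels

-- ===== LEMMAS AND PROOFS =====

theorem pvStdNames_length : pvStdNames.length = 34 := rfl

-- B as a map over List.range
theorem alt_eq_map_range (n : Int) (h : 0 ≤ n) :
    generate_standard_10_20_names_py_alt n
      = List.map (fun k : Nat => pvNameAt (k : Int)) (List.range n.toNat) := by
  unfold generate_standard_10_20_names_py_alt
  rw [PySem.List.pyRange_one 0 n, List.map_map]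
  have : (n - 0).toNat = n.toNat := by omega
  rw [this]
  apply List.map_congr_left
  intro k _
  simp

theorem pvNameAt_lt (k : Nat) (hk : k < 34) :
    pvNameAt (k : Int) = pvStdNames[k]'(by rw [pvStdNames_length]; exact hk) := by
  unfold pvNameAt
  rw [if_pos (by rw [pvStdNames_length]; exact_mod_cast hk)]
  rw [PySem.List.pyGetD_natCast]
  exact List.getD_eq_getElem _ _ (by rw [pvStdNames_length]; exact hk)

theorem pvNameAt_ge (k : Nat) (hk : 34 ≤ k) :
    pvNameAt (k : Int) = "EX" ++ PySem.Int.toStr ((k : Int) - 34 + 1) := by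
  unfold pvNameAt
  rw [if_neg (by rw [pvStdNames_length]; exact_mod_cast not_lt.mpr hk)]
  simp [pvStdNames_length]

-- ===== VERDICT =====
theorem generate_standard_10_20_names_py_spec : Claim_unchanged_generate_standard_10_20_names_py := by
  intro n _ hD
  unfold D_generate_standard_10_20_names_py at hD
  unfold generate_standard_10_20_names_py
  by_cases hn : 0 ≤ n
  · rw [alt_eq_map_range n hn]
    by_cases h34 : n ≤ (pvStdNames.length : Int)
    · rw [if_pos h34]
      rw [pvStdNames_length] at h34
      rw [PySem.List.slice_to _ hn]
      apply List.ext_getElem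
      · simp [pvStdNames_length]; omega
      · intro i h1 h2
        have hi : i < n.toNat := by simpa using h2
        have hi34 : i < 34 := by omega
        rw [List.getElem_take, List.getElem_map, List.getElem_range,
            pvNameAt_lt i hi34]
    · rw [if_neg h34]
      rw [pvStdNames_length] at h34
      apply List.ext_getElem
      · simp [pvStdNames_length, PySem.List.length_pyRange_one]; omega
      · intro i h1 h2
        have hi : i < n.toNat := by simpa using h2
        rw [List.getElem_map, List.getElem_range]
        by_cases hlt : i < 34
        · rw [List.getElem_append_left (by rw [pvStdNames_length]; exact hlt),
              pvNameAt_lt i hlt]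
        · push Not at hlt
          rw [pvNameAt_ge i hlt]
          rw [List.getElem_append_right (by rw [pvStdNames_length]; omega)]
          rw [List.getElem_map, PySem.List.getElem_pyRange_one]
          congr 2
          rw [pvStdNames_length]
          omega
  · -- n < 0 and ¬ D_ : n ≤ -34; both sides are []
    push Not at hn
    have hle : n ≤ -34 := by omega
    rw [if_pos (by rw [pvStdNames_length]; omega)]
    unfold generate_standard_10_20_names_py_alt
    rw [PySem.List.pyRange_one_eq_nil (by omega)]
    have hk : n = -(((-n).toNat : Nat) : Int) := by omega
    rw [hk, PySem.List.slice_to_neg_natCast _ _ (by omega)]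
    simp only [List.map_nil]
    rw [List.take_eq_nil_iff]
    left
    rw [pvStdNames_length]
    omega

theorem generate_standard_10_20_names_py_changed : Claim_changed_generate_standard_10_20_names_py := by
  unfold Claim_changed_generate_standard_10_20_names_py; decide

theorem generate_standard_10_20_names_py_tight : Claim_exact_generate_standard_10_20_names_py := by
  intro n _ hD
  unfold D_generate_standard_10_20_names_py at hD
  unfold generate_standard_10_20_names_py generate_standard_10_20_names_py_alt
  rw [if_pos (by rw [pvStdNames_length]; omega)]
  rw [PySem.List.pyRange_one_eq_nil (by omega)]
  simp only [List.map_nil]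
  intro hcontra
  have hk : n = -(((-n).toNat : Nat) : Int) := by omega
  rw [hk, PySem.List.slice_to_neg_natCast _ _ (by omega)] at hcontra
  have := congrArg List.length hcontra
  simp only [List.length_take, List.length_nil, pvStdNames_length] at this
  omega
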